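-- pv_equiv track=rewrite | github.com/RedBlaze261/ARP_Spoofing | src/live_detect.py | ip_to_int_safe
-- ===== SOURCE A (Python) =====
-- def ip_to_int_safe(ip: str) -> int:
--     try:
--         parts = [int(p) for p in str(ip).split('.')]
--         if len(parts) != 4:
--             return 0
--         return (parts[0]<<24) | (parts[1]<<16) | (parts[2]<<8) | parts[3]
--     except:
--         return 0
-- ===== SOURCE B (Python) =====
-- def ip_to_int_safe(ip: str) -> int:
--     # Single pass: shift-OR accumulator over the dot-separated octets,
--     # no intermediate list; count checked after the loop.
--     try:
--         result = 0
--         count = 0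
--         for p in str(ip).split('.'):
--             result = (result << 8) | int(p)
--             count += 1
--         return result if count == 4 else 0
--     except:
--         return 0
-- ===== Notes on version B (the rewrite author's own statement) =====
-- stated objective: alternative
-- what changed: Replaces the build-a-list-then-index bit-shift expression with a single accumulator pass ((result<<8)|octet) over the split parts, counting them as it goes instead of materialising the list and testing its length.
import Mathlib
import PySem

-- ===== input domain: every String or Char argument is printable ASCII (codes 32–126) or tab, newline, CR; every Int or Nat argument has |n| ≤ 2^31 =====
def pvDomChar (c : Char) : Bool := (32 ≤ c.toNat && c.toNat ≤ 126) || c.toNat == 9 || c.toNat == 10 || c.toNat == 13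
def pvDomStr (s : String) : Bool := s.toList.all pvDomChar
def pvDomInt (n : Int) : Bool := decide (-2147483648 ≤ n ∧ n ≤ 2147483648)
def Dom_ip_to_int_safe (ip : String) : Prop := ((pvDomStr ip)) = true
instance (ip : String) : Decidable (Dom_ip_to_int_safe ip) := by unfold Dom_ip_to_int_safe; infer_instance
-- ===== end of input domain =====

-- B replaces A's build-a-list-then-index bit-shift expression by a single shift-OR
-- accumulator pass over the split parts with an octet count (alternative decomposition, same cost).


-- ===== PORT A =====
-- try: parts = [int(p) for p in str(ip).split('.')]  (any ValueError → except → 0)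
def ip_to_int_safe (ip : String) : Int :=
  match ((PySem.Str.split? ip ".").getD []).mapM PySem.Int.ofStr? with
  | none => 0
  | some parts =>
    if parts.length ≠ 4 then 0
    else PySem.Int.bor (PySem.Int.bor (PySem.Int.bor
          (PySem.List.pyGetD parts 0 0 <<< (24:Nat))
          (PySem.List.pyGetD parts 1 0 <<< (16:Nat)))
          (PySem.List.pyGetD parts 2 0 <<< (8:Nat)))
          (PySem.List.pyGetD parts 3 0)

-- ===== PORT B =====
-- the loop body: result = (result << 8) | int(p); count += 1; None = the exception already raised
def ipAltStep (acc : Option (Int × Int)) (p : String) : Option (Int × Int) :=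
  match acc, PySem.Int.ofStr? p with
  | some (r, c), some v => some (PySem.Int.bor (r <<< (8:Nat)) v, c + 1)
  | _, _ => none

def ip_to_int_safe_alt (ip : String) : Int :=
  match ((PySem.Str.split? ip ".").getD []).foldl ipAltStep (some (0, 0)) with
  | none => 0
  | some (r, c) => if c = 4 then r else 0

-- ===== PRECONDITION & SPEC =====
def Spec_ip_to_int_safe (ip : String) (out : Int) : Prop := out = ip_to_int_safe_alt ip
instance (ip : String) (out : Int) : Decidable (Spec_ip_to_int_safe ip out) := by unfold Spec_ip_to_int_safe; infer_instance

-- ===== CLAIM (what is proved, stated in full; the proofs are below) =====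
def Claim_equal_ip_to_int_safe : Prop := ∀ (ip : String), Dom_ip_to_int_safe ip → Spec_ip_to_int_safe ip (ip_to_int_safe ip)

-- ===== LEMMAS AND PROOFS =====

-- n - (n &&& m) = n.ldiff m (bits of n not in m)
theorem nat_sub_and_eq_ldiff : ∀ (n m : Nat), n - (n &&& m) = Nat.ldiff n m := by
  intro n
  induction n using Nat.binaryRec with
  | zero =>
    intro m
    have h0 : Nat.ldiff 0 m = 0 := Nat.eq_of_testBit_eq fun k => by simp [Nat.testBit_ldiff]
    simp [h0]
  | bit b n ih =>
    intro m
    conv_lhs => rw [← Nat.bit_testBit_zero_shiftRight_one m, Nat.land_bit]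
    conv_rhs => rw [← Nat.bit_testBit_zero_shiftRight_one m, Nat.ldiff_bit]
    have h1 := ih (m >>> 1)
    have hle : n &&& (m >>> 1) ≤ n := Nat.and_le_left
    cases b <;> cases m.testBit 0 <;>
      simp only [Nat.bit_val, Bool.and_true, Bool.and_false, Bool.not_true, Bool.not_false,
        Bool.toNat_true, Bool.toNat_false] <;> omega

-- PySem's Python-exact OR is Mathlib's Int.lor
theorem bor_eq_lor (a b : Int) : PySem.Int.bor a b = Int.lor a b := by
  cases a with
  | ofNat m =>
    cases b with
    | ofNat n => simp [PySem.Int.bor, Int.lor]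
    | negSucc n =>
      simp only [PySem.Int.bor, Int.lor]
      rw [if_pos (show (0:Int) ≤ Int.ofNat m by exact Int.natCast_nonneg m), if_neg (show ¬ (0:Int) ≤ Int.negSucc n from not_le.mpr (Int.negSucc_lt_zero n))]
      have h2 : (-(Int.negSucc n) - 1).toNat = n := by simp [Int.negSucc_eq]
      have h3 : (Int.ofNat m).toNat = m := rfl
      rw [h2, h3, nat_sub_and_eq_ldiff, Int.negSucc_eq]
      ring
  | negSucc m =>
    cases b with
    | ofNat n =>
      simp only [PySem.Int.bor, Int.lor]
      rw [if_neg (show ¬ (0:Int) ≤ Int.negSucc m from not_le.mpr (Int.negSucc_lt_zero m)), if_pos (show (0:Int) ≤ Int.ofNat n by exact Int.natCast_nonneg n)]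
      have h2 : (-(Int.negSucc m) - 1).toNat = m := by simp [Int.negSucc_eq]
      have h3 : (Int.ofNat n).toNat = n := rfl
      rw [h2, h3, nat_sub_and_eq_ldiff, Int.negSucc_eq]
      ring
    | negSucc n =>
      simp only [PySem.Int.bor, Int.lor]
      rw [if_neg (show ¬ (0:Int) ≤ Int.negSucc m from not_le.mpr (Int.negSucc_lt_zero m)), if_neg (show ¬ (0:Int) ≤ Int.negSucc n from not_le.mpr (Int.negSucc_lt_zero n))]
      have h2 : (-(Int.negSucc m) - 1).toNat = m := by simp [Int.negSucc_eq]
      have h3 : (-(Int.negSucc n) - 1).toNat = n := by simp [Int.negSucc_eq]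
      rw [h2, h3, Int.negSucc_eq]
      ring

theorem int_zero_lor (a : Int) : Int.lor 0 a = a := by
  have hz : (0:Int) = Int.ofNat 0 := rfl
  rw [hz]
  cases a with
  | ofNat n => simp [Int.lor]
  | negSucc n =>
    simp only [Int.lor]
    congr 1
    exact Nat.eq_of_testBit_eq fun k => by simp [Nat.testBit_ldiff]

theorem two_mul_lor (x y : Int) : 2 * Int.lor x y = Int.lor (2 * x) (2 * y) := by
  have h := Int.lor_bit false x false y
  simpa [Int.bit] using h.symm

-- left shift distributes over OR
theorem lor_shiftLeft (x y : Int) (k : Nat) :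
    (Int.lor x y) <<< k = Int.lor (x <<< k) (y <<< k) := by
  induction k with
  | zero => simp
  | succ k ih =>
    rw [Int.shiftLeft_succ', Int.shiftLeft_succ', Int.shiftLeft_succ', ih, two_mul_lor]

-- the pure accumulator fold over already-parsed octets, from an arbitrary start
def ipAltPure (acc : Int × Int) (vs : List Int) : Int × Int :=
  vs.foldl (fun rc v => (PySem.Int.bor (rc.1 <<< (8:Nat)) v, rc.2 + 1)) acc

theorem foldl_step_none (l : List String) : l.foldl ipAltStep none = none := by
  induction l with
  | nil => rfl
  | cons p l ih => simpa [ipAltStep] using ih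

theorem foldl_step_eq : ∀ (l : List String) (acc : Int × Int),
    l.foldl ipAltStep (some acc) = (l.mapM PySem.Int.ofStr?).map (ipAltPure acc) := by
  intro l
  induction l with
  | nil => intro acc; rfl
  | cons p l ih =>
    intro acc
    cases hp : PySem.Int.ofStr? p with
    | none => simp [ipAltStep, hp, List.mapM_cons, foldl_step_none]
    | some v =>
      simp only [List.foldl_cons, ipAltStep, hp]
      rw [ih]
      cases hm : l.mapM PySem.Int.ofStr? with
      | none => simp [List.mapM_cons, hp, hm]
      | some vs => simp [List.mapM_cons, hp, hm, ipAltPure]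

theorem ipAltPure_snd (vs : List Int) (acc : Int × Int) :
    (ipAltPure acc vs).2 = acc.2 + vs.length := by
  induction vs generalizing acc with
  | nil => simp [ipAltPure]
  | cons v vs ih => simp [ipAltPure] at ih ⊢; rw [ih]; ring

theorem length_eq_four {α : Type} {l : List α} (h : l.length = 4) :
    ∃ a b c d, l = [a, b, c, d] := by
  match l, h with
  | [a, b, c, d], _ => exact ⟨a, b, c, d, rfl⟩

theorem ipAltPure_four (a b c d : Int) :
    (ipAltPure (0, 0) [a, b, c, d]).1 =
      PySem.Int.bor (PySem.Int.bor (PySem.Int.bor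
        (a <<< (24:Nat)) (b <<< (16:Nat))) (c <<< (8:Nat))) d := by
  simp only [ipAltPure, List.foldl_cons, List.foldl_nil]
  simp only [bor_eq_lor]
  have hz : ((0:Int) <<< (8:Nat)) = 0 := rfl
  rw [hz, int_zero_lor]
  rw [lor_shiftLeft, lor_shiftLeft]
  have h16 : (a <<< (8:Nat)) <<< (8:Nat) = a <<< (16:Nat) := by rw [← Int.shiftLeft_add]
  have h24 : (a <<< (16:Nat)) <<< (8:Nat) = a <<< (24:Nat) := by rw [← Int.shiftLeft_add]
  have hb16 : (b <<< (8:Nat)) <<< (8:Nat) = b <<< (16:Nat) := by rw [← Int.shiftLeft_add]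
  rw [h16, lor_shiftLeft, h24, hb16]

-- ===== VERDICT (by name: the statement is the Claim_ definition above) =====
theorem ip_to_int_safe_spec : Claim_equal_ip_to_int_safe := by
  intro ip _
  unfold Spec_ip_to_int_safe ip_to_int_safe ip_to_int_safe_alt
  rw [foldl_step_eq]
  cases hm : ((PySem.Str.split? ip ".").getD []).mapM PySem.Int.ofStr? with
  | none => rfl
  | some parts =>
    simp only [Option.map_some]
    by_cases hl : parts.length = 4
    · obtain ⟨a, b, c, d, rfl⟩ := length_eq_four hl
      have hc : (ipAltPure (0, 0) [a, b, c, d]).2 = 4 := by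
        rw [ipAltPure_snd]; norm_num
      have hpair : ipAltPure (0, 0) [a, b, c, d] =
          ((ipAltPure (0, 0) [a, b, c, d]).1, (ipAltPure (0, 0) [a, b, c, d]).2) := rfl
      rw [hpair, hc, ipAltPure_four]
      simp [PySem.List.pyGetD, PySem.List.pyIdx?, PySem.List.pyGet?]
    · have hc : (ipAltPure (0, 0) parts).2 ≠ 4 := by
        rw [ipAltPure_snd]; omega
      have hpair : ipAltPure (0, 0) parts =
          ((ipAltPure (0, 0) parts).1, (ipAltPure (0, 0) parts).2) := rfl
      rw [hpair]
      simp [hl, hc]
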